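-- pv_equiv track=rewrite | github.com/LUFFY-KIngofCoder/DSA | 1605-minimum-number-of-days-to-make-m-bouquets/minimum-number-of-days-to-make-m-bouquets.py | no_bouque
-- ===== SOURCE A (Python) =====
-- def no_bouque(nums, d,k):
--     count = 0
--     c=0
--     for i in nums:
--         if i - d <= 0:
--             c+=1
--         else:
--             c=0
--         if c == k:
--             count+=1
--             c=0
--
--     return count
-- ===== SOURCE B (Python) =====
-- def no_bouque(nums, d, k):
--     cuts = [i for i, x in enumerate(nums) if x - d > 0]
--     bounds = [-1] + cuts + [len(nums)]
--     return sum((b - a - 1) // k for a, b in zip(bounds, bounds[1:]))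
-- ===== Notes on version B (the rewrite author's own statement) =====
-- stated objective: alternative
-- what changed: B computes the cut positions (indices of non-qualifying flowers) by enumeration, brackets them with -1 and len(nums), and sums (gap-1)//k over adjacent pairs, replacing A's stateful tick-to-k-and-reset counter with index-gap arithmetic over two staged passes.
-- outside the precondition, e.g. on no_bouque([1, 5], 3, 0): A returns 1, B raises ZeroDivisionError; on no_bouque([1], 5, -1): A returns 0, B returns -1
import Mathlib
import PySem

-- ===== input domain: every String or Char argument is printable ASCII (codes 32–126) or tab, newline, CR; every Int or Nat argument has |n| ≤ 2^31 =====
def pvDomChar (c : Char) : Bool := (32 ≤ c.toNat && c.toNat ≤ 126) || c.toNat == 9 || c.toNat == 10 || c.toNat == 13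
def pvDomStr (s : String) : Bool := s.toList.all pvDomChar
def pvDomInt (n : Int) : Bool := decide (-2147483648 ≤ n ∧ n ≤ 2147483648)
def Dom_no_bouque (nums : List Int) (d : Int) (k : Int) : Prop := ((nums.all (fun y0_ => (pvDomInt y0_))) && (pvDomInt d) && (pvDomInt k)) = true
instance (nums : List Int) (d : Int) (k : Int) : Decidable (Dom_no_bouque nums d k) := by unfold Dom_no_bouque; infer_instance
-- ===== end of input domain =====

-- B replaces A's stateful tick-to-k-and-reset counter by index-gap arithmetic over the cut
-- positions, bracketed by -1 and len(nums) (objective: alternative decomposition, same cost).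

-- ===== PORT A =====
-- state = (count, c); branches in the source's order
def no_bouque (nums : List Int) (d : Int) (k : Int) : Int :=
  let s := nums.foldl (fun (st : Int × Int) i =>
    let c := if i - d ≤ 0 then st.2 + 1 else 0
    if c = k then (st.1 + 1, 0) else (st.1, c)) (0, 0)
  s.1

-- ===== PORT B =====
-- cuts = indices of non-qualifying flowers; bounds = [-1] ++ cuts ++ [len];
-- result = sum of (b - a - 1) // k over adjacent pairs (zip bounds bounds.tail)
def no_bouque_alt (nums : List Int) (d : Int) (k : Int) : Int :=
  let cuts : List Int := ((PySem.List.enumerate nums).filter (fun p => decide (p.2 - d > 0))).map (fun p => p.1)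
  let bounds : List Int := (-1 : Int) :: (cuts ++ [(nums.length : Int)])
  (bounds.zip bounds.tail).foldl (fun acc p => acc + PySem.Int.floordiv (p.2 - p.1 - 1) k) 0

-- ===== PRECONDITION & SPEC =====
-- Pre_ excludes k ≤ 0, outside the task's natural domain (flowers per bouquet): there A's
-- counter accidentally returns the number of non-qualifying flowers (k = 0) or 0 (k < 0),
-- while B's (gap-1) // k raises ZeroDivisionError (k = 0) or floors negatively (k < 0).
def Pre_no_bouque (nums : List Int) (d : Int) (k : Int) : Prop := 1 ≤ k
instance (nums : List Int) (d : Int) (k : Int) : Decidable (Pre_no_bouque nums d k) := by unfold Pre_no_bouque; infer_instance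
def pvWitness_no_bouque : List Int × Int × Int := ([1, 5, 2, 2, 9], 3, 2)

def Spec_no_bouque (nums : List Int) (d : Int) (k : Int) (out : Int) : Prop := out = no_bouque_alt nums d k
instance (nums : List Int) (d : Int) (k : Int) (out : Int) : Decidable (Spec_no_bouque nums d k out) := by unfold Spec_no_bouque; infer_instance

-- ===== CLAIM (what is proved, stated in full; the proofs are below) =====
def Claim_equal_no_bouque : Prop := ∀ (nums : List Int) (d : Int) (k : Int), Dom_no_bouque nums d k → Pre_no_bouque nums d k → Spec_no_bouque nums d k (no_bouque nums d k)

-- ===== LEMMAS AND PROOFS =====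

-- Common characterisation: pvF d k prev i xs = total bouquets in xs, where prev is the index
-- of the last cut (or -1) and i the index of the head of xs.
def pvF (d k : Int) : Int → Int → List Int → Int
  | prev, i, [] => PySem.Int.floordiv (i - prev - 1) k
  | prev, i, x :: xs =>
      if x - d > 0 then PySem.Int.floordiv (i - prev - 1) k + pvF d k i (i + 1) xs
      else pvF d k prev (i + 1) xs

-- The intermediate run-length fold both sides are related to.
def pvRun (d k : Int) (nums : List Int) (t r : Int) : Int :=
  let s := nums.foldl (fun (st : Int × Int) i =>
    if i - d ≤ 0 then (st.1, st.2 + 1)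
    else (st.1 + PySem.Int.floordiv st.2 k, 0)) (t, r)
  s.1 + PySem.Int.floordiv s.2 k

-- Loop invariant between A's state (a, c) and the run fold's state (t, r):
-- a = t + r // k, c = r % k, 0 ≤ r.
theorem no_bouque_fold_rel (d k : Int) (hk : 1 ≤ k) (nums : List Int) :
    ∀ (a c t r : Int), 0 ≤ r → a = t + PySem.Int.floordiv r k → c = PySem.Int.mod r k →
      (nums.foldl (fun (st : Int × Int) i =>
        let c := if i - d ≤ 0 then st.2 + 1 else 0
        if c = k then (st.1 + 1, 0) else (st.1, c)) (a, c)).1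
      = pvRun d k nums t r := by
  induction nums with
  | nil =>
    intro a c t r hr ha hc
    simp [pvRun, ha]
  | cons x xs ih =>
    intro a c t r hr ha hc
    simp only [pvRun, List.foldl_cons] at ih ⊢
    by_cases hx : x - d ≤ 0
    · have hkpos : (0:Int) < k := by omega
      have hdiv := PySem.Int.floordiv_eq_ediv_of_pos (a := r) hkpos
      have hdiv' := PySem.Int.floordiv_eq_ediv_of_pos (a := r + 1) hkpos
      have hmod := PySem.Int.mod_eq_emod_of_pos (a := r) hkpos
      have hmod' := PySem.Int.mod_eq_emod_of_pos (a := r + 1) hkpos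
      have hmlt : r % k < k := Int.emod_lt_of_pos r hkpos
      have hmge : 0 ≤ r % k := Int.emod_nonneg r (by omega)
      have hsplit := Int.emod_add_mul_ediv r k
      by_cases hck : c + 1 = k
      · have hrm : r % k = k - 1 := by omega
        have hr1 : r + 1 = (r / k + 1) * k := by linarith
        have h2 : (r + 1) / k = r / k + 1 := by
          rw [hr1, Int.mul_ediv_cancel _ (by omega)]
        have h1 : (r + 1) % k = 0 := by
          rw [hr1, Int.mul_emod_left]
        simp only [hx, if_pos, if_pos hck]
        rw [ih (a + 1) 0 t (r + 1) (by omega)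
          (by rw [hdiv', h2, ha, hdiv]; ring)
          (by rw [hmod', h1])]
      · have hm1lt : r % k + 1 < k := by omega
        have hr1 : r + 1 = (r % k + 1) + k * (r / k) := by linarith
        have h2 : (r + 1) / k = r / k := by
          rw [hr1, Int.add_mul_ediv_left _ _ (by omega : k ≠ 0),
            Int.ediv_eq_zero_of_lt (by omega) hm1lt, zero_add]
        have h1 : (r + 1) % k = r % k + 1 := by
          rw [hr1, Int.add_mul_emod_self_left, Int.emod_eq_of_lt (by omega) hm1lt]
        simp only [hx, if_pos, if_neg hck]
        rw [ih a (c + 1) t (r + 1) (by omega)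
          (by rw [hdiv', h2, ha, hdiv])
          (by rw [hmod', h1, hc, hmod])]
    · have hkne : (0:Int) ≠ k := by omega
      simp only [hx, if_false, if_neg hkne]
      rw [ih a 0 (t + PySem.Int.floordiv r k) 0 le_rfl
        (by simpa [PySem.Int.floordiv] using ha)
        (by simp [PySem.Int.mod])]

-- The run fold computes pvF when r = i - prev - 1.
theorem run_eq_pvF (d k : Int) (nums : List Int) :
    ∀ (t r prev i : Int), r = i - prev - 1 →
      pvRun d k nums t r = t + pvF d k prev i nums := by
  induction nums with
  | nil =>
    intro t r prev i hr
    simp [pvRun, pvF, hr]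
  | cons x xs ih =>
    intro t r prev i hr
    simp only [pvRun, List.foldl_cons] at ih ⊢
    by_cases hx : x - d ≤ 0
    · have : ¬ x - d > 0 := by omega
      simp only [pvF, hx, if_pos, if_neg this]
      exact ih t (r + 1) prev (i + 1) (by omega)
    · have : x - d > 0 := by omega
      simp only [pvF, hx, if_false, if_pos this]
      rw [ih (t + PySem.Int.floordiv r k) 0 i (i + 1) (by omega), hr]
      ring


-- B's zip-of-bounds fold computes pvF (generalised over start index, left bound, accumulator).
theorem alt_aux (d k : Int) (nums : List Int) :
    ∀ (s a acc : Int),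
      (((a :: (((PySem.List.enumerate nums s).filter (fun p => decide (p.2 - d > 0))).map (fun p => p.1)
          ++ [s + (nums.length : Int)])).zip
        ((((PySem.List.enumerate nums s).filter (fun p => decide (p.2 - d > 0))).map (fun p => p.1)
          ++ [s + (nums.length : Int)]))).foldl
        (fun acc p => acc + PySem.Int.floordiv (p.2 - p.1 - 1) k) acc)
      = acc + pvF d k a s nums := by
  induction nums with
  | nil =>
    intro s a acc
    simp [PySem.List.enumerate, pvF]
  | cons x xs ih =>
    intro s a acc
    rw [PySem.List.enumerate_cons]
    by_cases hx : x - d > 0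
    · simp only [List.filter_cons, hx, decide_true, if_pos, List.map_cons]
      have hlen : s + ((x :: xs).length : Int) = (s + 1) + (xs.length : Int) := by
        simp; omega
      rw [hlen]
      simp only [List.cons_append, List.zip_cons_cons, List.foldl_cons]
      exact (ih (s + 1) s (acc + PySem.Int.floordiv (s - a - 1) k)).trans
        (by simp only [pvF, hx, if_pos]; ring)
    · simp only [List.filter_cons, hx, decide_false]
      have hlen : s + ((x :: xs).length : Int) = (s + 1) + (xs.length : Int) := by
        simp; omega
      rw [hlen]
      exact (ih (s + 1) a acc).trans (by simp only [pvF, hx, ite_false])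

-- ===== VERDICT (by name: the statement is the Claim_ definition above) =====
theorem no_bouque_spec : Claim_equal_no_bouque := by
  intro nums d k _ hk
  unfold Spec_no_bouque no_bouque no_bouque_alt
  rw [no_bouque_fold_rel d k hk nums 0 0 0 0 le_rfl (by simp [PySem.Int.floordiv]) (by simp [PySem.Int.mod]),
    run_eq_pvF d k nums 0 0 (-1) 0 (by ring)]
  have h := alt_aux d k nums 0 (-1) 0
  simp only [zero_add] at h ⊢
  rw [← h]
  rfl
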